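-- pv_equiv track=rewrite | github.com/Yash-Hirani/last-minute-chef | backend/recipe_engine.py | _match_ingredients
-- ===== SOURCE A (Python) =====
-- def _match_ingredients(user_norm: list[str], recipe_ings: list[str]):
--     """Score each recipe ingredient against the user's pantry."""
--     available, missing = [], []
--     for r_ing in recipe_ings:
--         matched = False
--         for u_ing in user_norm:
--             if u_ing == r_ing:
--                 matched = True; break
--             if len(u_ing) > 3 and (u_ing in r_ing or r_ing in u_ing):
--                 matched = True; break
--             # Word-level overlap for compounds ("cumin seeds" ↔ "cumin")
--             r_words = set(r_ing.split())
--             u_words = set(u_ing.split())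
--             if any(len(w) > 3 for w in (r_words & u_words)):
--                 matched = True; break
--         (available if matched else missing).append(r_ing)
--     return available, missing
-- ===== SOURCE B (Python) =====
-- def _match_ingredients(user_norm: list[str], recipe_ings: list[str]):
--     """Score each recipe ingredient against the user's pantry."""
--     # Inverted index: long (>3 chars) word -> indices of recipes containing it.
--     index = {}
--     for i, r in enumerate(recipe_ings):
--         for w in r.split():
--             if len(w) > 3:
--                 index.setdefault(w, []).append(i)
--     # Pantry-major sweep: each user ingredient marks the recipe indices it matches.
--     matched = set()
--     for u in user_norm:
--         for w in u.split():
--             matched.update(index.get(w, ()))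
--         long_u = len(u) > 3
--         for i, r in enumerate(recipe_ings):
--             if u == r or (long_u and (u in r or r in u)):
--                 matched.add(i)
--     available = [r for i, r in enumerate(recipe_ings) if i in matched]
--     missing = [r for i, r in enumerate(recipe_ings) if i not in matched]
--     return available, missing
-- ===== Notes on version B (the rewrite author's own statement) =====
-- stated objective: faster
-- what changed: Transposes the computation: builds an inverted index from long words to recipe indices, then sweeps pantry-major (outer loop over user ingredients) marking a set of matched recipe indices, and finally partitions the recipes by that index set in one pass, instead of A's recipe-major loop that rebuilds and intersects word sets for every (recipe, user) pair.
import Mathlib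
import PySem

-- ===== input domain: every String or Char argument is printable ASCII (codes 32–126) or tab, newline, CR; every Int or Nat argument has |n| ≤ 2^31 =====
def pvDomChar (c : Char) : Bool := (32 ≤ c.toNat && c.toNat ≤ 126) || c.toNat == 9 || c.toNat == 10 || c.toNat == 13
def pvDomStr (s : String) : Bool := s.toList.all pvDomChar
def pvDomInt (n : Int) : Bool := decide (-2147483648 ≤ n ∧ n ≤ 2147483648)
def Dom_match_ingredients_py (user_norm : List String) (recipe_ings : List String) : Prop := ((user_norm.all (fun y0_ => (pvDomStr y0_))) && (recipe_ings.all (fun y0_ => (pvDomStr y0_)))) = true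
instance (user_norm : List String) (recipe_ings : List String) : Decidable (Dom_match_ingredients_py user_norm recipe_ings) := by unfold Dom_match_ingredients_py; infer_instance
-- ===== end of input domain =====

-- B transposes the computation: an inverted index from long words to recipe indices, a
-- pantry-major sweep marking a set of matched recipe indices, then one partition pass.

-- ===== PORT A =====
-- inner 'for u_ing in user_norm: … break' loop of A, returning the final 'matched'
def pvA_matched (r_ing : String) : List String → Bool
  | [] => false
  | u_ing :: rest =>
    if u_ing == r_ing then true
    else if decide (3 < PySem.Str.len u_ing) && (PySem.Str.isIn u_ing r_ing || PySem.Str.isIn r_ing u_ing) then true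
    else if (PySem.Set.inter (PySem.Set.ofList (PySem.Str.split₀ r_ing)) (PySem.Set.ofList (PySem.Str.split₀ u_ing))).any (fun w => decide (3 < PySem.Str.len w)) then true
    else pvA_matched r_ing rest

def match_ingredients_py (user_norm : List String) (recipe_ings : List String) : List String × List String :=
  recipe_ings.foldl (fun acc r_ing =>
    if pvA_matched r_ing user_norm then (acc.1 ++ [r_ing], acc.2)
    else (acc.1, acc.2 ++ [r_ing])) ([], [])

-- ===== PORT B =====
-- 'index = {}; for i, r in enumerate(recipe_ings): for w in r.split(): if len(w) > 3: index.setdefault(w, []).append(i)'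
def pvB_index (recipe_ings : List String) : PySem.Dict String (List Int) :=
  (PySem.List.enumerate recipe_ings 0).foldl (fun d p =>
    (PySem.Str.split₀ p.2).foldl (fun d w =>
      if 3 < PySem.Str.len w then d.insert w (d.getD w [] ++ [p.1]) else d) d)
    PySem.Dict.empty

-- body of 'for u in user_norm': word marks via the index, then the exact/substring scan
def pvB_mark (index : PySem.Dict String (List Int)) (recipe_ings : List String)
    (m : PySem.Set Int) (u : String) : PySem.Set Int :=
  let m1 := (PySem.Str.split₀ u).foldl (fun m w => PySem.Set.update m (index.getD w [])) m
  (PySem.List.enumerate recipe_ings 0).foldl (fun m p =>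
    if u == p.2 || (decide (3 < PySem.Str.len u) && (PySem.Str.isIn u p.2 || PySem.Str.isIn p.2 u))
    then PySem.Set.add m p.1 else m) m1

def match_ingredients_py_alt (user_norm : List String) (recipe_ings : List String) : List String × List String :=
  let index := pvB_index recipe_ings
  let matched := user_norm.foldl (pvB_mark index recipe_ings) PySem.Set.empty
  (((PySem.List.enumerate recipe_ings 0).filter (fun p => PySem.Set.contains matched p.1)).map (·.2),
   ((PySem.List.enumerate recipe_ings 0).filter (fun p => !PySem.Set.contains matched p.1)).map (·.2))

-- ===== PRECONDITION & SPEC =====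
def Spec_match_ingredients_py (user_norm : List String) (recipe_ings : List String) (out : List String × List String) : Prop := out = match_ingredients_py_alt user_norm recipe_ings
instance (user_norm : List String) (recipe_ings : List String) (out : List String × List String) : Decidable (Spec_match_ingredients_py user_norm recipe_ings out) := by unfold Spec_match_ingredients_py; infer_instance

-- ===== CLAIM =====
def Claim_equal_match_ingredients_py : Prop := ∀ (user_norm : List String) (recipe_ings : List String), Dom_match_ingredients_py user_norm recipe_ings → Spec_match_ingredients_py user_norm recipe_ings (match_ingredients_py user_norm recipe_ings)

-- ===== LEMMAS AND PROOFS =====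

-- the full per-pair condition A tests, as a Prop
def pvCond (u r : String) : Prop :=
  u = r ∨ (3 < PySem.Str.len u ∧ (PySem.Str.isIn u r = true ∨ PySem.Str.isIn r u = true))
    ∨ (∃ w, w ∈ PySem.Str.split₀ r ∧ w ∈ PySem.Str.split₀ u ∧ 3 < PySem.Str.len w)

lemma pvA_matched_iff (r : String) (us : List String) :
    pvA_matched r us = true ↔ ∃ u ∈ us, pvCond u r := by
  induction us with
  | nil => simp [pvA_matched]
  | cons u rest ih =>
    simp only [pvA_matched]
    split_ifs with h1 h2 h3
    · simp only [beq_iff_eq] at h1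
      simp only [List.mem_cons, true_iff]
      exact ⟨u, Or.inl rfl, Or.inl h1⟩
    · simp only [Bool.and_eq_true, Bool.or_eq_true, decide_eq_true_eq] at h2
      simp only [List.mem_cons, true_iff]
      exact ⟨u, Or.inl rfl, Or.inr (Or.inl h2)⟩
    · simp only [List.any_eq_true, decide_eq_true_eq] at h3
      obtain ⟨w, hw, hlen⟩ := h3
      rw [PySem.Set.mem_inter, PySem.Set.mem_ofList, PySem.Set.mem_ofList] at hw
      simp only [List.mem_cons, true_iff]
      exact ⟨u, Or.inl rfl, Or.inr (Or.inr ⟨w, hw.1, hw.2, hlen⟩)⟩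
    · rw [ih]
      simp only [Bool.and_eq_true, Bool.or_eq_true, decide_eq_true_eq, not_and, not_or] at h2
      simp only [List.any_eq_true, decide_eq_true_eq, not_exists, not_and] at h3
      constructor
      · rintro ⟨v, hv, h⟩; exact ⟨v, List.mem_cons_of_mem _ hv, h⟩
      · rintro ⟨v, hv, h⟩
        rcases List.mem_cons.mp hv with rfl | hv'
        · exfalso
          rcases h with h | h | ⟨w, hwr, hwu, hlen⟩
          · exact h1 (by simp [h])
          · have hf := h2 h.1
            rcases h.2 with h' | h'
            · exact hf.1 h'
            · exact hf.2 h'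
          · exact absurd hlen (by
              have := h3 w (by rw [PySem.Set.mem_inter, PySem.Set.mem_ofList, PySem.Set.mem_ofList]; exact ⟨hwr, hwu⟩)
              omega)
        · exact ⟨v, hv', h⟩

-- ===== index characterisation =====
lemma pvB_index_inner_mem (j : Int) (ws : List String) (d : PySem.Dict String (List Int)) (w : String) (i : Int) :
    i ∈ (ws.foldl (fun d w => if 3 < PySem.Str.len w then d.insert w (d.getD w [] ++ [j]) else d) d).getD w [] ↔
      i ∈ d.getD w [] ∨ (i = j ∧ 3 < PySem.Str.len w ∧ w ∈ ws) := by
  induction ws generalizing d with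
  | nil => simp
  | cons v ws ih =>
    simp only [List.foldl_cons, ih]
    split_ifs with hv
    · rw [PySem.Dict.getD_insert]
      rcases eq_or_ne w v with rfl | hw
      · simp only [if_true, List.mem_append, List.mem_cons, List.not_mem_nil, or_false]
        have hv' : 3 < PySem.Str.len w := hv
        tauto
      · simp only [if_neg hw, List.mem_cons]
        tauto
    · simp only [List.mem_cons]
      have : ∀ h : w = v, ¬ (3 < PySem.Str.len w) := fun h => h ▸ hv
      tauto

lemma pvB_index_outer (rs : List String) (s : Int) (d : PySem.Dict String (List Int)) (w : String) (i : Int) :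
    i ∈ ((PySem.List.enumerate rs s).foldl (fun d p =>
        (PySem.Str.split₀ p.2).foldl (fun d w =>
          if 3 < PySem.Str.len w then d.insert w (d.getD w [] ++ [p.1]) else d) d) d).getD w [] ↔
      i ∈ d.getD w [] ∨ (3 < PySem.Str.len w ∧ ∃ p ∈ PySem.List.enumerate rs s, p.1 = i ∧ w ∈ PySem.Str.split₀ p.2) := by
  induction rs generalizing s d with
  | nil => simp [PySem.List.enumerate_nil]
  | cons r rs ih =>
    rw [PySem.List.enumerate_cons]
    simp only [List.foldl_cons, ih, pvB_index_inner_mem, List.mem_cons]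
    constructor
    · rintro ((h | ⟨h1, h2, h3⟩) | ⟨hw, p, hp, h1, h2⟩)
      · tauto
      · exact Or.inr ⟨h2, (s, r), Or.inl rfl, h1.symm, h3⟩
      · exact Or.inr ⟨hw, p, Or.inr hp, h1, h2⟩
    · rintro (h | ⟨hw, p, (rfl | hp), h1, h2⟩)
      · tauto
      · exact Or.inl (Or.inr ⟨h1.symm, hw, h2⟩)
      · exact Or.inr ⟨hw, p, hp, h1, h2⟩

-- ===== marking characterisation =====
lemma pv_mark_words_mem (index : PySem.Dict String (List Int)) (ws : List String) (m : PySem.Set Int) (i : Int) :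
    i ∈ ws.foldl (fun m w => PySem.Set.update m (index.getD w [])) m ↔
      i ∈ m ∨ ∃ w ∈ ws, i ∈ index.getD w [] := by
  induction ws generalizing m with
  | nil => simp
  | cons w ws ih => simp [ih, PySem.Set.mem_update]; tauto

lemma pv_mark_pairs_mem (u : String) (ps : List (Int × String)) (m : PySem.Set Int) (i : Int) :
    i ∈ ps.foldl (fun m p =>
        if u == p.2 || (decide (3 < PySem.Str.len u) && (PySem.Str.isIn u p.2 || PySem.Str.isIn p.2 u))
        then PySem.Set.add m p.1 else m) m ↔
      i ∈ m ∨ ∃ p ∈ ps, p.1 = i ∧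
        (u = p.2 ∨ (3 < PySem.Str.len u ∧ (PySem.Str.isIn u p.2 = true ∨ PySem.Str.isIn p.2 u = true))) := by
  induction ps generalizing m with
  | nil => simp
  | cons p ps ih =>
    simp only [List.foldl_cons, ih, List.mem_cons]
    split_ifs with h
    · simp only [Bool.or_eq_true, beq_iff_eq, Bool.and_eq_true, decide_eq_true_eq] at h
      rw [PySem.Set.mem_add]
      constructor
      · rintro ((hm | rfl) | hrest)
        · tauto
        · exact Or.inr ⟨p, Or.inl rfl, rfl, h⟩
        · obtain ⟨q, hq, h1, h2⟩ := hrest; exact Or.inr ⟨q, Or.inr hq, h1, h2⟩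
      · rintro (hm | ⟨q, (rfl | hq), h1, h2⟩)
        · tauto
        · exact Or.inl (Or.inr h1.symm)
        · exact Or.inr ⟨q, hq, h1, h2⟩
    · constructor
      · rintro (hm | ⟨q, hq, h1, h2⟩)
        · tauto
        · exact Or.inr ⟨q, Or.inr hq, h1, h2⟩
      · rintro (hm | ⟨q, (rfl | hq), h1, h2⟩)
        · tauto
        · exact absurd (by simp only [Bool.or_eq_true, beq_iff_eq, Bool.and_eq_true, decide_eq_true_eq]; tauto) h
        · exact Or.inr ⟨q, hq, h1, h2⟩

lemma pvB_mark_mem (rs : List String) (m : PySem.Set Int) (u : String) (i : Int) :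
    i ∈ pvB_mark (pvB_index rs) rs m u ↔
      i ∈ m ∨ ∃ p ∈ PySem.List.enumerate rs 0, p.1 = i ∧ pvCond u p.2 := by
  unfold pvB_mark
  rw [pv_mark_pairs_mem, pv_mark_words_mem]
  unfold pvCond
  constructor
  · rintro ((hm | ⟨w, hw, hi⟩) | ⟨p, hp, h1, h2⟩)
    · tauto
    · unfold pvB_index at hi
      rw [pvB_index_outer] at hi
      rcases hi with hi | ⟨hlw, p, hp, h1, h2⟩
      · simp [PySem.Dict.empty, PySem.Dict.getD, PySem.Dict.get?] at hi
      · exact Or.inr ⟨p, hp, h1, Or.inr (Or.inr ⟨w, h2, hw, hlw⟩)⟩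
    · exact Or.inr ⟨p, hp, h1, by tauto⟩
  · rintro (hm | ⟨p, hp, h1, (h2 | h2 | ⟨w, hwr, hwu, hlw⟩)⟩)
    · tauto
    · exact Or.inr ⟨p, hp, h1, Or.inl h2⟩
    · exact Or.inr ⟨p, hp, h1, Or.inr h2⟩
    · refine Or.inl (Or.inr ⟨w, hwu, ?_⟩)
      unfold pvB_index
      rw [pvB_index_outer]
      exact Or.inr ⟨hlw, p, hp, h1, hwr⟩

lemma pvB_matched_mem (us rs : List String) (i : Int) :
    i ∈ us.foldl (pvB_mark (pvB_index rs) rs) PySem.Set.empty ↔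
      ∃ u ∈ us, ∃ p ∈ PySem.List.enumerate rs 0, p.1 = i ∧ pvCond u p.2 := by
  have gen : ∀ (us : List String) (m : PySem.Set Int),
      i ∈ us.foldl (pvB_mark (pvB_index rs) rs) m ↔
        i ∈ m ∨ ∃ u ∈ us, ∃ p ∈ PySem.List.enumerate rs 0, p.1 = i ∧ pvCond u p.2 := by
    intro us
    induction us with
    | nil => simp
    | cons u us ih =>
      intro m
      simp only [List.foldl_cons, ih, pvB_mark_mem, List.mem_cons]
      constructor
      · rintro ((hm | h) | ⟨v, hv, h⟩)
        · tauto
        · exact Or.inr ⟨u, Or.inl rfl, h⟩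
        · exact Or.inr ⟨v, Or.inr hv, h⟩
      · rintro (hm | ⟨v, (rfl | hv), h⟩)
        · tauto
        · exact Or.inl (Or.inr h)
        · exact Or.inr ⟨v, hv, h⟩
  rw [gen]
  simp [PySem.Set.empty]

-- ===== assembly =====
lemma pv_filter_enum (rs : List String) (s : Int) (g : Int × String → Bool) (f : String → Bool)
    (h : ∀ p ∈ PySem.List.enumerate rs s, g p = f p.2) :
    ((PySem.List.enumerate rs s).filter g).map (·.2) = rs.filter f := by
  induction rs generalizing s with
  | nil => simp [PySem.List.enumerate_nil]
  | cons r rs ih =>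
    have hr : g (s, r) = f r := h (s, r) (by rw [PySem.List.enumerate_cons]; exact List.mem_cons_self)
    have hrest := ih (s + 1) (fun p hp => h p (by rw [PySem.List.enumerate_cons]; exact List.mem_cons_of_mem _ hp))
    rw [PySem.List.enumerate_cons, List.filter_cons, List.filter_cons, hr]
    by_cases hf : f r
    · simp only [hf, if_true, List.map_cons, hrest]
    · simp only [hf, Bool.false_eq_true, if_false, hrest]

lemma pvA_foldl_eq (us rs : List String) (a b : List String) :
    rs.foldl (fun acc r_ing =>
      if pvA_matched r_ing us then (acc.1 ++ [r_ing], acc.2)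
      else (acc.1, acc.2 ++ [r_ing])) (a, b)
      = (a ++ rs.filter (fun r => pvA_matched r us), b ++ rs.filter (fun r => !pvA_matched r us)) := by
  induction rs generalizing a b with
  | nil => simp
  | cons r rs ih =>
    simp only [List.foldl_cons, List.filter_cons]
    by_cases hm : pvA_matched r us
    · simp [hm, ih]
    · simp [hm, ih]

lemma pv_contains_eq (us rs : List String) (p : Int × String) (hp : p ∈ PySem.List.enumerate rs 0) :
    PySem.Set.contains (us.foldl (pvB_mark (pvB_index rs) rs) PySem.Set.empty) p.1 = pvA_matched p.2 us := by
  rw [Bool.eq_iff_iff, PySem.Set.contains_iff, pvB_matched_mem, pvA_matched_iff]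
  constructor
  · rintro ⟨u, hu, q, hq, h1, h2⟩
    rw [PySem.List.mem_enumerate_iff] at hq hp
    obtain ⟨k, hk, rfl⟩ := hq
    obtain ⟨m, hm, rfl⟩ := hp
    have hkm : k = m := by simp at h1; omega
    subst hkm
    exact ⟨u, hu, h2⟩
  · rintro ⟨u, hu, hc⟩; exact ⟨u, hu, p, hp, rfl, hc⟩

-- ===== VERDICT =====
theorem match_ingredients_py_spec : Claim_equal_match_ingredients_py := by
  intro us rs _
  unfold Spec_match_ingredients_py match_ingredients_py match_ingredients_py_alt
  rw [pvA_foldl_eq]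
  simp only [List.nil_append]
  refine Prod.ext ?_ ?_
  · exact (pv_filter_enum rs 0 _ _ (fun p hp => pv_contains_eq us rs p hp)).symm
  · exact (pv_filter_enum rs 0 _ _ (fun p hp => by rw [pv_contains_eq us rs p hp])).symm
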